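-- pv_equiv track=rewrite | github.com/MrDarklake/Algorithm-Studies | Algorithm-Studies/python_lab/artan_listeler.py | artan_alt_dizileri_bul
-- ===== SOURCE A (Python) =====
-- def artan_alt_dizileri_bul(input_list):
--     if not input_list or len(input_list) < 2:
--         return []
--
--     sonuc = []
--
--     gecici_dizi = [input_list[0]]
--
--     for i in range(1, len(input_list)):
--         current_num = input_list[i]
--         previous_num = input_list[i - 1]
--
--         if current_num > previous_num:
--             gecici_dizi.append(current_num)
--
--         else:
--             if len(gecici_dizi) >= 2:
--                 sonuc.append(gecici_dizi)
--
--             gecici_dizi = [current_num]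
--
--     if len(gecici_dizi) >= 2:
--         sonuc.append(gecici_dizi)
--
--     return sonuc
-- ===== SOURCE B (Python) =====
-- def artan_alt_dizileri_bul(input_list):
--     n = len(input_list)
--     if n < 2:
--         return []
--     cuts = [i for i in range(1, n) if input_list[i] <= input_list[i - 1]]
--     bounds = [0] + cuts + [n]
--     return [input_list[s:e] for s, e in zip(bounds, bounds[1:]) if e - s >= 2]
-- ===== Notes on version B (the rewrite author's own statement) =====
-- stated objective: alternative
-- what changed: A grows the current run incrementally while emitting finished runs from a single stateful scan; B instead first collects the cut indices where the sequence stops increasing, then slices the list between consecutive boundaries and keeps slices of length >= 2.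
import Mathlib
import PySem

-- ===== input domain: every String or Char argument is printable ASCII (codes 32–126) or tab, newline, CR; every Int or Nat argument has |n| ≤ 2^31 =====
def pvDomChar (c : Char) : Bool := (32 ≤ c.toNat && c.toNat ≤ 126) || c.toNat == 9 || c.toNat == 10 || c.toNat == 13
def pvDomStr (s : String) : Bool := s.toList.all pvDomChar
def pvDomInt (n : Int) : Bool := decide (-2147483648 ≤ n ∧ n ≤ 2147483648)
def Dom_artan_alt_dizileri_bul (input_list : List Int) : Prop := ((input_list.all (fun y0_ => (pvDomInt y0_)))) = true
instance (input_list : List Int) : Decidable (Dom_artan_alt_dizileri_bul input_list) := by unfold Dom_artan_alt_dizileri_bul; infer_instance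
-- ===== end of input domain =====

-- B replaces A's incremental run-accumulator scan by two passes — collect the cut
-- indices where the sequence stops increasing, then slice the list between
-- consecutive boundaries — same cost, different decomposition (objective: alternative).

-- ===== PORT A =====
-- loop body of A's `for i in range(1, len(input_list))`; state = (sonuc, gecici_dizi)
def aStep (input_list : List Int) (st : List (List Int) × List Int) (i : Int) :
    List (List Int) × List Int :=
  let current_num := PySem.List.pyGetD input_list i 0
  let previous_num := PySem.List.pyGetD input_list (i - 1) 0
  if current_num > previous_num then (st.1, st.2 ++ [current_num])
  else (if 2 ≤ st.2.length then st.1 ++ [st.2] else st.1, [current_num])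

def aLoop (input_list : List Int) : List (List Int) × List Int :=
  (PySem.List.pyRange 1 (input_list.length : Int)).foldl (aStep input_list)
    ([], [PySem.List.pyGetD input_list 0 0])

def artan_alt_dizileri_bul (input_list : List Int) : List (List Int) :=
  if input_list = [] ∨ (input_list.length : Int) < 2 then []
  else
    let st := aLoop input_list
    if 2 ≤ st.2.length then st.1 ++ [st.2] else st.1

-- ===== PORT B =====
-- cuts = [i for i in range(1, n) if input_list[i] <= input_list[i - 1]]
def bCuts (input_list : List Int) : List Int :=
  (PySem.List.pyRange 1 (input_list.length : Int)).filter
    (fun i => PySem.List.pyGetD input_list i 0 ≤ PySem.List.pyGetD input_list (i - 1) 0)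

def artan_alt_dizileri_bul_alt (input_list : List Int) : List (List Int) :=
  let n : Int := input_list.length
  if n < 2 then []
  else
    let bounds := 0 :: (bCuts input_list ++ [n])
    ((bounds.zip bounds.tail).filter (fun p => 2 ≤ p.2 - p.1)).map
      (fun p => PySem.List.slice input_list (some p.1) (some p.2))

-- ===== PRECONDITION & SPEC =====
def Spec_artan_alt_dizileri_bul (input_list : List Int) (out : List (List Int)) : Prop := out = artan_alt_dizileri_bul_alt input_list
instance (input_list : List Int) (out : List (List Int)) : Decidable (Spec_artan_alt_dizileri_bul input_list out) := by unfold Spec_artan_alt_dizileri_bul; infer_instance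

-- ===== CLAIM (what is proved, stated in full; the proofs are below) =====
def Claim_equal_artan_alt_dizileri_bul : Prop := ∀ (input_list : List Int), Dom_artan_alt_dizileri_bul input_list → Spec_artan_alt_dizileri_bul input_list (artan_alt_dizileri_bul input_list)

-- ===== LEMMAS AND PROOFS =====

-- B's slicing pass, parametrised by the boundary list
def segs (xs : List Int) (c : List Int) : List (List Int) :=
  ((c.zip c.tail).filter (fun p => 2 ≤ p.2 - p.1)).map
    (fun p => PySem.List.slice xs (some p.1) (some p.2))

lemma zip_tail_concat {α : Type} (c : List α) (h : c ≠ []) (x : α) :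
    (c ++ [x]).zip ((c ++ [x]).tail) = c.zip c.tail ++ [(c.getLast h, x)] := by
  induction c with
  | nil => simp at h
  | cons a t ih =>
    cases t with
    | nil => simp
    | cons b t2 => simp_all [List.getLast]

lemma segs_concat (xs : List Int) (c : List Int) (hc : c ≠ []) (m : Int) :
    segs xs (c ++ [m]) = segs xs c ++
      (if 2 ≤ m - c.getLast hc then [PySem.List.slice xs (some (c.getLast hc)) (some m)] else []) := by
  unfold segs
  rw [zip_tail_concat c hc m, List.filter_append, List.map_append]
  congr 1
  by_cases h : 2 ≤ m - c.getLast hc <;> simp [h]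

lemma mem_bCuts (xs : List Int) {i : Int} (h : i ∈ bCuts xs) :
    1 ≤ i ∧ i < (xs.length : Int) := by
  unfold bCuts at h
  have := List.mem_of_mem_filter h
  exact PySem.List.mem_pyRange_one.mp this

lemma mem_c_bounds (xs : List Int) {v : Int} (hne : xs ≠ [])
    (h : v ∈ (0 : Int) :: bCuts xs) : 0 ≤ v ∧ v < (xs.length : Int) := by
  have hlen : 0 < xs.length := List.length_pos_iff.mpr hne
  rcases List.mem_cons.mp h with h0 | hc
  · subst h0; constructor <;> [omega; exact_mod_cast hlen]
  · have := mem_bCuts xs hc; omega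

lemma getD_append_lt (ys : List Int) (x : Int) {i : Int} (h0 : 0 ≤ i)
    (h1 : i < (ys.length : Int)) :
    PySem.List.pyGetD (ys ++ [x]) i 0 = PySem.List.pyGetD ys i 0 := by
  rw [PySem.List.pyGetD_eq_getElem _ _ h0 (by simp; omega),
      PySem.List.pyGetD_eq_getElem _ _ h0 h1,
      List.getElem_append_left (by omega)]

lemma getD_concat_len (ys : List Int) (x : Int) :
    PySem.List.pyGetD (ys ++ [x]) (ys.length : Int) 0 = x := by
  rw [PySem.List.pyGetD_eq_getElem _ _ (by omega) (by simp)]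
  simp

lemma getD_concat_pen (ys : List Int) (x : Int) (h : ys ≠ []) :
    PySem.List.pyGetD (ys ++ [x]) ((ys.length : Int) - 1) 0 = ys.getLast h := by
  have hlen : 0 < ys.length := List.length_pos_iff.mpr h
  rw [getD_append_lt ys x (by omega) (by omega),
      PySem.List.pyGetD_eq_getElem _ _ (by omega) (by omega),
      List.getLast_eq_getElem]
  congr 1
  omega

lemma slice_concat_of_le (ys : List Int) (x : Int) {s e : Int} (hs : 0 ≤ s) (he : 0 ≤ e)
    (heL : e ≤ (ys.length : Int)) :
    PySem.List.slice (ys ++ [x]) (some s) (some e) = PySem.List.slice ys (some s) (some e) := by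
  rw [PySem.List.slice_toNat _ hs he, PySem.List.slice_toNat _ hs he]
  by_cases hsL : s.toNat ≤ ys.length
  · rw [List.drop_append_of_le_length hsL,
        List.take_append_of_le_length (by simp; omega)]
  · have h1 : e.toNat - s.toNat = 0 := by omega
    rw [h1]; simp

lemma segs_concat_list (ys : List Int) (x : Int) (hne : ys ≠ []) :
    segs (ys ++ [x]) ((0 : Int) :: bCuts ys) = segs ys ((0 : Int) :: bCuts ys) := by
  unfold segs
  apply List.map_congr_left
  intro p hp
  have hz := List.of_mem_zip (List.mem_of_mem_filter hp)
  have h1 := mem_c_bounds ys hne hz.1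
  have h2 := mem_c_bounds ys hne (List.mem_of_mem_tail hz.2)
  exact slice_concat_of_le ys x h1.1 h2.1 (by omega)

lemma bCuts_concat (ys : List Int) (x : Int) (hne : ys ≠ []) :
    bCuts (ys ++ [x]) = bCuts ys ++
      (if x ≤ ys.getLast hne then [(ys.length : Int)] else []) := by
  have hlen : 0 < ys.length := List.length_pos_iff.mpr hne
  unfold bCuts
  have hn : ((ys ++ [x]).length : Int) = (ys.length : Int) + 1 := by simp
  rw [hn, PySem.List.pyRange_one_succ_right (by omega), List.filter_append]
  congr 1
  · apply List.filter_congr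
    intro i hi
    have hm := PySem.List.mem_pyRange_one.mp hi
    rw [getD_append_lt ys x (by omega) (by omega),
        getD_append_lt ys x (by omega) (by omega)]
  · rw [List.filter_singleton]
    simp only [getD_concat_len, getD_concat_pen ys x hne]
    by_cases h : x ≤ ys.getLast hne <;> simp [h]

lemma aLoop_concat (ys : List Int) (x : Int) (hne : ys ≠ []) :
    aLoop (ys ++ [x]) = aStep (ys ++ [x]) (aLoop ys) (ys.length : Int) := by
  have hlen : 0 < ys.length := List.length_pos_iff.mpr hne
  unfold aLoop
  have hn : ((ys ++ [x]).length : Int) = (ys.length : Int) + 1 := by simp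
  rw [hn, PySem.List.pyRange_one_succ_right (by omega), List.foldl_append]
  simp only [List.foldl_cons, List.foldl_nil]
  congr 1
  rw [getD_append_lt ys x (by omega) (by exact_mod_cast hlen)]
  apply PySem.List.foldl_congr_mem
  intro acc i hi
  have hm := PySem.List.mem_pyRange_one.mp hi
  unfold aStep
  rw [getD_append_lt ys x (by omega) (by omega),
      getD_append_lt ys x (by omega) (by omega)]

-- the last boundary before the final segment
def lastC (xs : List Int) : Int := ((0 : Int) :: bCuts xs).getLast?.getD 0

lemma lastC_eq_getLast (xs : List Int) :
    lastC xs = ((0 : Int) :: bCuts xs).getLast (by simp) := by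
  unfold lastC
  rw [List.getLast?_eq_some_getLast]
  rfl

lemma lastC_bounds (xs : List Int) (hne : xs ≠ []) :
    0 ≤ lastC xs ∧ lastC xs < (xs.length : Int) := by
  rw [lastC_eq_getLast]
  exact mem_c_bounds xs hne (List.getLast_mem _)

lemma trailing_slice (xs : List Int) (hne : xs ≠ []) :
    PySem.List.slice xs (some (lastC xs)) (some (xs.length : Int)) =
      xs.drop (lastC xs).toNat := by
  have hb := lastC_bounds xs hne
  rw [PySem.List.slice_toNat _ hb.1 (by omega)]
  exact List.take_of_length_le (by simp)

-- the loop invariant: A's state after the scan, in terms of B's cut indices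
lemma aLoop_spec (xs : List Int) (hne : xs ≠ []) :
    (aLoop xs).2 = xs.drop (lastC xs).toNat ∧
    (aLoop xs).1 = segs xs ((0 : Int) :: bCuts xs) := by
  induction xs using List.reverseRecOn with
  | nil => simp at hne
  | append_singleton ys x ih =>
    by_cases hys : ys = []
    · subst hys
      simp only [List.nil_append]
      have hc : bCuts [x] = [] := by
        unfold bCuts
        rw [show (([x] : List Int).length : Int) = 1 by simp,
            PySem.List.pyRange_one_eq_nil le_rfl]
        rfl
      have hl : aLoop [x] = ([], [x]) := by
        unfold aLoop
        rw [show (([x] : List Int).length : Int) = 1 by simp,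
            PySem.List.pyRange_one_eq_nil le_rfl]
        simp [PySem.List.pyGetD_zero]
      refine ⟨?_, ?_⟩
      · rw [hl]; simp [lastC, hc]
      · rw [hl]; simp [segs, hc]
    · have hlen : 0 < ys.length := List.length_pos_iff.mpr hys
      obtain ⟨ih2, ih1⟩ := ih hys
      have hb := lastC_bounds ys hys
      rw [aLoop_concat ys x hys]
      unfold aStep
      rw [getD_concat_len, getD_concat_pen ys x hys]
      by_cases hcmp : x > ys.getLast hys
      · -- the run continues: no new cut
        have hcuts : bCuts (ys ++ [x]) = bCuts ys := by
          rw [bCuts_concat ys x hys,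
              if_neg (show ¬x ≤ ys.getLast hys by omega), List.append_nil]
        have hlc : lastC (ys ++ [x]) = lastC ys := by unfold lastC; rw [hcuts]
        rw [if_pos hcmp]
        refine ⟨?_, ?_⟩
        · simp only [ih2, hlc]
          rw [List.drop_append_of_le_length (by omega)]
        · simp only [ih1, hcuts, segs_concat_list ys x hys]
      · -- a cut at index ys.length: the run is flushed
        have hcuts : bCuts (ys ++ [x]) = bCuts ys ++ [(ys.length : Int)] := by
          rw [bCuts_concat ys x hys, if_pos (by omega)]
        have hlc : lastC (ys ++ [x]) = (ys.length : Int) := by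
          unfold lastC
          rw [hcuts]
          show (((0 : Int) :: bCuts ys) ++ [(ys.length : Int)]).getLast?.getD 0 = _
        
          rw [List.getLast?_concat]
          rfl
        rw [if_neg hcmp]
        refine ⟨?_, ?_⟩
        · rw [hlc, show ((ys.length : Int)).toNat = ys.length by omega,
              List.drop_append_of_le_length le_rfl, List.drop_length,
              List.nil_append]
        · have hdl : ((ys.drop (lastC ys).toNat).length : Int) =
              (ys.length : Int) - lastC ys := by simp; omega
          rw [hcuts,
              show (0 : Int) :: (bCuts ys ++ [(ys.length : Int)]) =
                ((0 : Int) :: bCuts ys) ++ [(ys.length : Int)] from rfl,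
              segs_concat (ys ++ [x]) ((0 : Int) :: bCuts ys) (by simp) (ys.length : Int),
              ← lastC_eq_getLast, segs_concat_list ys x hys, ← ih1]
          have hsl : PySem.List.slice (ys ++ [x]) (some (lastC ys)) (some (ys.length : Int)) =
              (aLoop ys).2 := by
            rw [slice_concat_of_le ys x hb.1 (by omega) (by omega),
                trailing_slice ys hys, ih2]
          rw [hsl, ih2]
          by_cases hgec : 2 ≤ (ys.drop (lastC ys).toNat).length
          · rw [if_pos hgec, if_pos (by omega)]
          · rw [if_neg hgec, if_neg (by omega)]; simp

-- ===== VERDICT (by name: the statement is the Claim_ definition above) =====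
theorem artan_alt_dizileri_bul_spec : Claim_equal_artan_alt_dizileri_bul := by
  intro xs _
  unfold Spec_artan_alt_dizileri_bul artan_alt_dizileri_bul artan_alt_dizileri_bul_alt
  by_cases hn : (xs.length : Int) < 2
  · rw [if_pos (Or.inr hn), if_pos hn]
  · have hne : xs ≠ [] := by
      intro h; subst h; simp at hn
    obtain ⟨h2, h1⟩ := aLoop_spec xs hne
    have hb := lastC_bounds xs hne
    rw [if_neg (show ¬(xs = [] ∨ (xs.length : Int) < 2) from fun h => h.elim hne hn),
        if_neg hn]
    show (if 2 ≤ (aLoop xs).2.length then (aLoop xs).1 ++ [(aLoop xs).2] else (aLoop xs).1) =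
      ((((0 : Int) :: (bCuts xs ++ [(xs.length : Int)])).zip
          ((0 : Int) :: (bCuts xs ++ [(xs.length : Int)])).tail).filter
        (fun p => 2 ≤ p.2 - p.1)).map
        (fun p => PySem.List.slice xs (some p.1) (some p.2))
  
    rw [show ((((0 : Int) :: (bCuts xs ++ [(xs.length : Int)])).zip
          ((0 : Int) :: (bCuts xs ++ [(xs.length : Int)])).tail).filter
        (fun p => 2 ≤ p.2 - p.1)).map
        (fun p => PySem.List.slice xs (some p.1) (some p.2)) =
        segs xs (((0 : Int) :: bCuts xs) ++ [(xs.length : Int)]) from rfl,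
        segs_concat xs ((0 : Int) :: bCuts xs) (by simp) (xs.length : Int),
        ← lastC_eq_getLast, trailing_slice xs hne, ← h1, ← h2]
    have hdl : ((aLoop xs).2.length : Int) = (xs.length : Int) - lastC xs := by
      rw [h2]; simp; omega
    by_cases hgec : 2 ≤ (aLoop xs).2.length
    · rw [if_pos hgec, if_pos (by omega)]
    · rw [if_neg hgec, if_neg (by omega)]; simp
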